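-- pv_equiv track=rewrite | github.com/James-Hazelwood/CSC_480_Project_1 | planner.py | find_important_info
-- ===== SOURCE A (Python) =====
-- def find_important_info(world: list[list]) -> (int, list[int]):
--     count = 0
--     start = []
--
--     for i in range(len(world)):
--         for j in range(len(world[0])):
--             if world[i][j] == "@":
--                 start = [i, j]
--             elif world[i][j] == "*":
--                 count += 1
--
--     return count, start
-- ===== SOURCE B (Python) =====
-- def find_important_info(world: list[list]) -> (int, list[int]):
--     if not world:
--         return 0, []
--     w = len(world[0])
--     count = sum(1 for i in range(len(world)) for j in range(w) if world[i][j] == "*")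
--     start = []
--     for i in reversed(range(len(world))):
--         for j in reversed(range(w)):
--             if world[i][j] == "@":
--                 start = [i, j]
--                 break
--         if start:
--             break
--     return count, start
-- ===== Notes on version B (the rewrite author's own statement) =====
-- stated objective: alternative
-- what changed: Replaces the single combined forward scan carrying (count,start) state by a pure one-pass star count plus a reverse scan with early exit that finds the last '@' directly.
import Mathlib
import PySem

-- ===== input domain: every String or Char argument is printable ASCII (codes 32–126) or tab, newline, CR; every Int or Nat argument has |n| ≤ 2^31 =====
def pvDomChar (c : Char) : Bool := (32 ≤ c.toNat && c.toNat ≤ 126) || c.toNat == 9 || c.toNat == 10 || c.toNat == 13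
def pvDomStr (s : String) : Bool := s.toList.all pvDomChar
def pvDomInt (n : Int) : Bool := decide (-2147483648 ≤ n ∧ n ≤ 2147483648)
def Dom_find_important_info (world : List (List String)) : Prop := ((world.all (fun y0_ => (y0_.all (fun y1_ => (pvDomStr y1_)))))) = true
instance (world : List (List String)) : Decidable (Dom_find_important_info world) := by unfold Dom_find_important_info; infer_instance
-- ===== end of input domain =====

-- B differs from A in decomposition only: a pure star count plus a reverse scan with
-- early exit for the last '@', instead of A's single forward scan carrying both.
-- world[i][j] is ported as pvCell via PySem.List.pyGetD; exact on Pre_ (no IndexError).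

-- ===== PORT A =====
-- shared cell access world[i][j] (exact on in-range indices, which Pre_ guarantees)
def pvCell (world : List (List String)) (i j : Nat) : String :=
  PySem.List.pyGetD (PySem.List.pyGetD world (i : Int) []) (j : Int) ""

def find_important_info (world : List (List String)) : Int × List Int :=
  (List.range world.length).foldl (fun cs (i : Nat) =>
    (List.range (world.headD []).length).foldl (fun cs (j : Nat) =>
      if pvCell world i j == "@" then (cs.1, [(i : Int), (j : Int)])
      else if pvCell world i j == "*" then (cs.1 + 1, cs.2)
      else cs) cs)
    ((0 : Int), ([] : List Int))

-- ===== PORT B =====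
def find_important_info_alt (world : List (List String)) : Int × List Int :=
  match world with
  | [] => (0, [])
  | r0 :: _ =>
    let w := r0.length
    let count : Int :=
      (((List.range world.length).flatMap (fun (i : Nat) =>
          (List.range w).filter (fun (j : Nat) => pvCell world i j == "*"))).length : Int)
    let start : List Int :=
      match (List.range world.length).reverse.findSome? (fun (i : Nat) =>
          ((List.range w).reverse.find? (fun (j : Nat) => pvCell world i j == "@")).map
            (fun (j : Nat) => [(i : Int), (j : Int)])) with
      | some s => s
      | none => []
    (count, start)

-- ===== PRECONDITION & SPEC =====
-- Pre_ excludes exactly the ragged grids on which Python A raises IndexError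
-- (some row shorter than the first row); B raises there too.
def Pre_find_important_info (world : List (List String)) : Prop :=
  ∀ row ∈ world, (world.headD []).length ≤ row.length
instance (world : List (List String)) : Decidable (Pre_find_important_info world) := by
  unfold Pre_find_important_info; infer_instance
def pvWitness_find_important_info : List (List String) := [["@", "*"], ["*", "."]]

def Spec_find_important_info (world : List (List String)) (out : Int × List Int) : Prop := out = find_important_info_alt world
instance (world : List (List String)) (out : Int × List Int) : Decidable (Spec_find_important_info world out) := by unfold Spec_find_important_info; infer_instance

-- ===== CLAIM (what is proved, stated in full; the proofs are below) =====
def Claim_equal_find_important_info : Prop := ∀ (world : List (List String)), Dom_find_important_info world → Pre_find_important_info world → Spec_find_important_info world (find_important_info world)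

-- ===== LEMMAS AND PROOFS =====

-- a fold whose two state components evolve independently splits
theorem foldl_prod_split {α β γ : Type} (fc : β → α → β) (fs : γ → α → γ) :
    ∀ (l : List α) (c : β) (s : γ),
      l.foldl (fun cs x => (fc cs.1 x, fs cs.2 x)) (c, s) = (l.foldl fc c, l.foldl fs s) := by
  intro l
  induction l with
  | nil => intro c s; rfl
  | cons a l ih => intro c s; simpa using ih (fc c a) (fs s a)

-- counting fold over Int
theorem foldl_count_int {α : Type} (p : α → Bool) :
    ∀ (l : List α) (c : Int),
      l.foldl (fun c x => if p x then c + 1 else c) c = c + (l.countP p : Int) := by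
  intro l
  induction l with
  | nil => intro c; simp
  | cons a l ih =>
    intro c
    by_cases h : p a = true <;> (simp [h, ih]; try ring)

-- accumulating fold of a Nat-valued summand over Int
theorem foldl_add_int {α : Type} (k : α → Nat) :
    ∀ (l : List α) (c : Int),
      l.foldl (fun c x => c + (k x : Int)) c = c + ((l.map k).sum : Int) := by
  intro l
  induction l with
  | nil => intro c; simp
  | cons a l ih => intro c; simp [ih]; ring

-- "last matching element wins" fold = first match of the reversed list
theorem foldl_last_update {α β : Type} (p : α → Bool) (f : α → β) :
    ∀ (l : List α) (s : β),
      l.foldl (fun s x => if p x then f x else s) s =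
        (l.reverse.find? p).elim s f := by
  intro l
  induction l with
  | nil => intro s; rfl
  | cons a l ih =>
    intro s
    simp only [List.foldl_cons, ih, List.reverse_cons, List.find?_append]
    cases h : l.reverse.find? p with
    | some x => simp
    | none => by_cases hp : p a = true <;> simp [hp, List.find?]

theorem findSome?_eq_find?_bind {α β : Type} (f : α → Option β) :
    ∀ (l : List α), l.findSome? f = (l.find? (fun x => (f x).isSome)).bind f := by
  intro l
  induction l with
  | nil => rfl
  | cons a l ih =>
    cases h : f a with
    | some b => simp [List.find?, h]
    | none => simp [List.find?, h, ih]

theorem find_important_info_spec : Claim_equal_find_important_info := by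
  intro world _ _
  unfold Spec_find_important_info find_important_info find_important_info_alt
  cases world with
  | nil => simp
  | cons r0 rest =>
    simp only [List.headD_cons]
    set W := r0 :: rest with hW
    set n := W.length with hn
    set w := r0.length with hw
    -- A's inner step splits component-wise
    have hstep : ∀ (i : Nat) (cs : Int × List Int),
        (List.range w).foldl (fun cs j =>
          if pvCell W i j == "@" then (cs.1, [(i : Int), (j : Int)])
          else if pvCell W i j == "*" then (cs.1 + 1, cs.2) else cs) cs =
        ((List.range w).foldl (fun c j => if pvCell W i j == "*" then c + 1 else c) cs.1,
         (List.range w).foldl (fun s j => if pvCell W i j == "@" then [(i : Int), (j : Int)] else s) cs.2) := by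
      intro i cs
      have hfun : (fun (cs : Int × List Int) j =>
          if pvCell W i j == "@" then (cs.1, [(i : Int), (j : Int)])
          else if pvCell W i j == "*" then (cs.1 + 1, cs.2) else cs) =
          (fun cs j => ((fun c j => if pvCell W i j == "*" then c + 1 else c) cs.1 j,
                        (fun s j => if pvCell W i j == "@" then [(i : Int), (j : Int)] else s) cs.2 j)) := by
        funext cs j
        by_cases h1 : pvCell W i j == "@"
        · have h2 : (pvCell W i j == "*") = false := by
            have := (beq_iff_eq).mp h1; simp [this]
          simp [h1, h2]
        · simp [h1]; split <;> rfl
      obtain ⟨c, s⟩ := cs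
      rw [hfun]
      exact foldl_prod_split (fun c j => if pvCell W i j == "*" then c + 1 else c)
        (fun s j => if pvCell W i j == "@" then [(i : Int), (j : Int)] else s) (List.range w) c s
    -- the outer fold splits the same way
    have houter :
        (List.range n).foldl (fun cs i =>
          (List.range w).foldl (fun cs j =>
            if pvCell W i j == "@" then (cs.1, [(i : Int), (j : Int)])
            else if pvCell W i j == "*" then (cs.1 + 1, cs.2) else cs) cs)
          ((0 : Int), ([] : List Int)) =
        ((List.range n).foldl (fun c i =>
            (List.range w).foldl (fun c j => if pvCell W i j == "*" then c + 1 else c) c) 0,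
         (List.range n).foldl (fun s i =>
            (List.range w).foldl (fun s j => if pvCell W i j == "@" then [(i : Int), (j : Int)] else s) s) []) := by
      have hfun : (fun (cs : Int × List Int) i =>
          (List.range w).foldl (fun cs j =>
            if pvCell W i j == "@" then (cs.1, [(i : Int), (j : Int)])
            else if pvCell W i j == "*" then (cs.1 + 1, cs.2) else cs) cs) =
          (fun cs i => ((fun c i =>
              (List.range w).foldl (fun c j => if pvCell W i j == "*" then c + 1 else c) c) cs.1 i,
            (fun s i =>
              (List.range w).foldl (fun s j => if pvCell W i j == "@" then [(i : Int), (j : Int)] else s) s) cs.2 i)) := by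
        funext cs i
        exact hstep i cs
      rw [hfun]
      exact foldl_prod_split
        (fun c i => (List.range w).foldl (fun c j => if pvCell W i j == "*" then c + 1 else c) c)
        (fun s i => (List.range w).foldl (fun s j => if pvCell W i j == "@" then [(i : Int), (j : Int)] else s) s)
        (List.range n) 0 []
    rw [houter]
    refine Prod.ext ?_ ?_ <;> simp only
    · -- count component
      have h1 : (fun (c : Int) (i : Nat) =>
          (List.range w).foldl (fun c j => if pvCell W i j == "*" then c + 1 else c) c) =
          fun c i => c + (((List.range w).countP (fun j => pvCell W i j == "*")) : Int) :=
        funext fun c => funext fun i => foldl_count_int _ _ _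
      rw [h1, foldl_add_int (fun i => (List.range w).countP (fun j => pvCell W i j == "*"))]
      simp [List.length_flatMap, List.countP_eq_length_filter]
    · -- start component
      have h2 : (fun (s : List Int) (i : Nat) =>
          (List.range w).foldl (fun s j => if pvCell W i j == "@" then [(i : Int), (j : Int)] else s) s) =
          fun s i => ((List.range w).reverse.find? (fun j => pvCell W i j == "@")).elim s
            (fun j => [(i : Int), (j : Int)]) :=
        funext fun s => funext fun i => foldl_last_update _ _ _ _
      have h3 : (fun (s : List Int) (i : Nat) =>
          ((List.range w).reverse.find? (fun j => pvCell W i j == "@")).elim s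
            (fun j => [(i : Int), (j : Int)])) =
          fun s i => if ((List.range w).reverse.find? (fun j => pvCell W i j == "@")).isSome then
            ((List.range w).reverse.find? (fun j => pvCell W i j == "@")).elim []
              (fun j => [(i : Int), (j : Int)])
          else s := by
        funext s i
        cases h : (List.range w).reverse.find? (fun j => pvCell W i j == "@") <;> simp
      rw [h2, h3, foldl_last_update, findSome?_eq_find?_bind]
      have h4 : (fun (i : Nat) =>
          (((List.range w).reverse.find? (fun j => pvCell W i j == "@")).map
            (fun (j : Nat) => [(i : Int), (j : Int)])).isSome) =
          fun i => ((List.range w).reverse.find? (fun j => pvCell W i j == "@")).isSome := by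
        funext i; simp
      rw [h4]
      cases h : (List.range n).reverse.find?
          (fun i => ((List.range w).reverse.find? (fun j => pvCell W i j == "@")).isSome) with
      | none => simp
      | some i =>
        have hi := List.find?_some h
        simp only [Option.isSome_iff_exists] at hi
        obtain ⟨j, hj⟩ := hi
        simp [hj]
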